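-- pv_equiv track=rewrite | github.com/rhit-martina9/MA491_Project1 | BruteForce_obstacles.py | get_path_len
-- ===== SOURCE A (Python) =====
-- ns_dist = 15
--
-- ew_dist = 20
--
-- def get_path_len(path):
--     total = 0
--     for i in range(len(path)-1):
--         if abs(path[i]-path[i+1]) == 1:
--             total += ew_dist
--         else:
--             total += ns_dist
--     return total
-- ===== SOURCE B (Python) =====
-- ns_dist = 15
--
-- ew_dist = 20
--
-- def get_path_len(path):
--     # Divide and conquer: cost of edges between indices lo..hi, splitting at the midpoint.
--     def seg(lo, hi):
--         if hi - lo < 1: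
--             return 0
--         if hi - lo == 1:
--             return ew_dist if abs(path[lo] - path[hi]) == 1 else ns_dist
--         mid = (lo + hi) // 2
--         return seg(lo, mid) + seg(mid, hi)
--     return seg(0, len(path) - 1)
-- ===== Notes on version B (the rewrite author's own statement) =====
-- stated objective: alternative
-- what changed: Replaces A's left-to-right indexed accumulation loop with a divide-and-conquer recursion that splits the index segment at its midpoint and adds the two halves' costs, with a single edge as base case.
import Mathlib
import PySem

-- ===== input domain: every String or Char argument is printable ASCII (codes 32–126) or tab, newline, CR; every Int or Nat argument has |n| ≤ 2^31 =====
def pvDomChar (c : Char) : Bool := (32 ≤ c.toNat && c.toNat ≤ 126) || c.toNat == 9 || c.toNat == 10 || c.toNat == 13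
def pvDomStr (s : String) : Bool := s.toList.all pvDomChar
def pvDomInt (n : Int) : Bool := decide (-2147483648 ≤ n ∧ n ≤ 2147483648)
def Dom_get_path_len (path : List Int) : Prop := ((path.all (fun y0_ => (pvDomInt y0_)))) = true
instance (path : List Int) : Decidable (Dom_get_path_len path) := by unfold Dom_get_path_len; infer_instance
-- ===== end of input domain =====

-- B computes the same total by divide-and-conquer on index segments (split at the midpoint) instead of A's left-to-right indexed accumulation (objective: alternative).


-- ===== PORT A =====
def get_path_len (path : List Int) : Int :=
  (PySem.List.pyRange 0 ((path.length : Int) - 1) 1).foldl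
    (fun total i =>
      if (PySem.List.pyGetD path i 0 - PySem.List.pyGetD path (i + 1) 0).natAbs = 1
      then total + 20
      else total + 15) 0

-- ===== PORT B =====
-- seg lo hi: cost of the edges between indices lo..hi, by splitting at the midpoint
def pvSeg (path : List Int) (lo hi : Int) : Int :=
  if hi - lo < 1 then 0
  else if hi - lo = 1 then
    (if (PySem.List.pyGetD path lo 0 - PySem.List.pyGetD path hi 0).natAbs = 1 then 20 else 15)
  else
    pvSeg path lo (PySem.Int.floordiv (lo + hi) 2) + pvSeg path (PySem.Int.floordiv (lo + hi) 2) hi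
termination_by (hi - lo).toNat
decreasing_by
  all_goals
    rw [PySem.Int.floordiv_eq_ediv_of_pos (by omega : (0:Int) < 2)]
    omega

def get_path_len_alt (path : List Int) : Int :=
  pvSeg path 0 ((path.length : Int) - 1)

-- ===== PRECONDITION & SPEC =====
def Spec_get_path_len (path : List Int) (out : Int) : Prop := out = get_path_len_alt path
instance (path : List Int) (out : Int) : Decidable (Spec_get_path_len path out) := by unfold Spec_get_path_len; infer_instance

-- ===== CLAIM (what is proved, stated in full; the proofs are below) =====
def Claim_equal_get_path_len : Prop := ∀ (path : List Int), Dom_get_path_len path → Spec_get_path_len path (get_path_len path)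

-- ===== LEMMAS AND PROOFS =====

-- the cost of the single edge starting at index i
def pvCost (path : List Int) (i : Int) : Int :=
  if (PySem.List.pyGetD path i 0 - PySem.List.pyGetD path (i + 1) 0).natAbs = 1 then 20 else 15

theorem pv_foldl_add_cost (path : List Int) (l : List Int) (acc : Int) :
    l.foldl (fun total i =>
      if (PySem.List.pyGetD path i 0 - PySem.List.pyGetD path (i + 1) 0).natAbs = 1
      then total + 20 else total + 15) acc
    = acc + (l.map (pvCost path)).sum := by
  induction l generalizing acc with
  | nil => simp
  | cons x l ih =>
    simp only [List.foldl_cons, List.map_cons, List.sum_cons, ih, pvCost]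
    split_ifs <;> ring

theorem pv_seg_eq_sum (path : List Int) (lo hi : Int) :
    pvSeg path lo hi = ((PySem.List.pyRange lo hi 1).map (pvCost path)).sum := by
  by_cases h1 : hi - lo < 1
  · rw [pvSeg]
    simp [h1, PySem.List.pyRange_one_eq_nil (by omega : hi ≤ lo)]
  · by_cases h2 : hi - lo = 1
    · rw [pvSeg]
      have hhi : hi = lo + 1 := by omega
      subst hhi
      simp [h1, PySem.List.pyRange_one_singleton, pvCost]
    · rw [pvSeg]
      simp only [h1, h2, if_false]
      have hmid := PySem.Int.floordiv_two_mid_bounds (lo := lo) (hi := hi) (by omega)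
      rw [pv_seg_eq_sum path lo _, pv_seg_eq_sum path _ hi,
          PySem.List.pyRange_one_append lo (PySem.Int.floordiv (lo + hi) 2) hi hmid.1 hmid.2,
          List.map_append, List.sum_append]
termination_by (hi - lo).toNat
decreasing_by
  all_goals
    rw [PySem.Int.floordiv_eq_ediv_of_pos (by omega : (0:Int) < 2)] at *
    omega

-- ===== VERDICT (by name: the statement is the Claim_ definition above) =====
theorem get_path_len_spec : Claim_equal_get_path_len := by
  intro path _
  unfold Spec_get_path_len get_path_len_alt get_path_len
  rw [pv_foldl_add_cost, pv_seg_eq_sum]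
  ring
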